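-- pv_equiv track=rewrite | github.com/pypi-data/pypi-mirror-364 | packages/hsi-wizard/hsi_wizard-0.1.42-py3-none-any.whl/wizard/_utils/helper.py | find_nex_smaller_wave
-- ===== SOURCE A (Python) =====
-- def find_nex_smaller_wave(waves, wave_1: int, maximum_deviation: int = 5) -> int:
--     """
--     Find the next smaller wave value within a specified deviation.
--
--     This function searches for the largest wave value smaller than or equal to `wave_1`
--     that exists in the `waves` list, within a deviation range up to `maximum_deviation`.
--     If no such wave is found, the function returns -1.
--
--     Parameters
--     ----------
--     waves : list[int]
--         A list of integer wave values to search within.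
--     wave_1 : int
--         The reference wave value to find the next smaller wave before.
--     maximum_deviation : int, optional
--         The maximum negative offset from `wave_1` to consider (default is 5).
--
--     Returns
--     -------
--     int
--         The next smaller wave value found within the range, or -1 if none exists.
--
--     Raises
--     ------
--     None
--
--     Notes
--     -----
--     The function stops searching once it finds the first match within the allowed range.
--
--     Examples
--     --------
--     >>> find_nex_smaller_wave([390, 395, 400, 405], 402)
--     400
--
--     >>> find_nex_smaller_wave([390, 395, 400, 405], 389)
--     -1
--     """
--     wave_next = -1
--
--     for n in range(maximum_deviation):
--         wave_n = wave_1 - n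
--
--         if wave_n in waves:
--             wave_next = wave_n
--             break
--
--     return wave_next
-- ===== SOURCE B (Python) =====
-- def find_nex_smaller_wave(waves, wave_1: int, maximum_deviation: int = 5) -> int:
--     return max((w for w in waves if 0 <= wave_1 - w < maximum_deviation), default=-1)
-- ===== Notes on version B (the rewrite author's own statement) =====
-- stated objective: faster
-- what changed: B scans the waves list once keeping the maximum qualifying element (max with default -1) instead of generating candidate offsets 0..maximum_deviation-1 and membership-testing each against waves.
import Mathlib
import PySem

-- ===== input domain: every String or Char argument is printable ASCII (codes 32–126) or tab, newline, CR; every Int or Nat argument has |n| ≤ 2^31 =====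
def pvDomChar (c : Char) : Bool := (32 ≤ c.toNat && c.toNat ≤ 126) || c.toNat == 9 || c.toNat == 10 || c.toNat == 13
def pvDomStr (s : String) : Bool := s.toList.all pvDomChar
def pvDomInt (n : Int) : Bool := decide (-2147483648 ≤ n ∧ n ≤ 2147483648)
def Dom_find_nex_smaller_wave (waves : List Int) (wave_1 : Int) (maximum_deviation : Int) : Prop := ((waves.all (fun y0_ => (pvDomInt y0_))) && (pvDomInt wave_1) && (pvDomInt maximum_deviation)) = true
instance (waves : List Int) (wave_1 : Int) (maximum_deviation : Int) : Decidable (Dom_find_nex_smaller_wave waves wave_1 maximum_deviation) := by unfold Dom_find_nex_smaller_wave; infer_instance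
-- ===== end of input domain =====

-- B replaces A's candidate-offset probing loop by a single pass over `waves` keeping the
-- maximum qualifying element (objective: simpler).

-- ===== PORT A =====
-- A's `for n in range(maximum_deviation): … if wave_n in waves: …; break` loop, with the
-- break rendered as an early-returning recursion over the range list.
def pvALoop (waves : List Int) (wave_1 : Int) : List Int → Int
  | [] => -1
  | n :: ns =>
    let wave_n := wave_1 - n
    if waves.contains wave_n then wave_n else pvALoop waves wave_1 ns

def find_nex_smaller_wave (waves : List Int) (wave_1 : Int) (maximum_deviation : Int) : Int :=
  pvALoop waves wave_1 (PySem.List.pyRange 0 maximum_deviation 1)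

-- ===== PORT B =====
-- B's `max((w for w in waves if 0 <= wave_1 - w < maximum_deviation), default=-1)`.
def find_nex_smaller_wave_alt (waves : List Int) (wave_1 : Int) (maximum_deviation : Int) : Int :=
  match (waves.filter (fun w => decide (0 ≤ wave_1 - w) && decide (wave_1 - w < maximum_deviation))).max? with
  | some m => m
  | none => -1

-- ===== PRECONDITION & SPEC =====
def Spec_find_nex_smaller_wave (waves : List Int) (wave_1 : Int) (maximum_deviation : Int) (out : Int) : Prop := out = find_nex_smaller_wave_alt waves wave_1 maximum_deviation
instance (waves : List Int) (wave_1 : Int) (maximum_deviation : Int) (out : Int) : Decidable (Spec_find_nex_smaller_wave waves wave_1 maximum_deviation out) := by unfold Spec_find_nex_smaller_wave; infer_instance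

-- ===== CLAIM (what is proved, stated in full; the proofs are below) =====
def Claim_equal_find_nex_smaller_wave : Prop := ∀ (waves : List Int) (wave_1 : Int) (maximum_deviation : Int), Dom_find_nex_smaller_wave waves wave_1 maximum_deviation → Spec_find_nex_smaller_wave waves wave_1 maximum_deviation (find_nex_smaller_wave waves wave_1 maximum_deviation)

-- ===== LEMMAS AND PROOFS =====

-- Core invariant: on the range [a, b), A's early-exit scan over offsets equals the max of
-- the waves whose offset wave_1 - w lies in [a, b), defaulting to -1.
-- If wave_1 - a is in waves and a is the smallest offset of the window, it is the max of the filtered list.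
theorem pvMax_single (waves : List Int) (wave_1 : Int) (a b : Int)
    (h2 : a < b) (hmem : waves.contains (wave_1 - a)) :
    (match (waves.filter (fun w => decide (a ≤ wave_1 - w) && decide (wave_1 - w < b))).max? with
     | some m => m
     | none => -1) = wave_1 - a := by
  have hmax : (waves.filter (fun w => decide (a ≤ wave_1 - w) && decide (wave_1 - w < b))).max? = some (wave_1 - a) := by
    rw [List.max?_eq_some_iff]
    constructor
    · apply List.mem_filter.mpr
      refine ⟨List.contains_iff_mem.mp hmem, ?_⟩
      simp only [Bool.and_eq_true, decide_eq_true_eq]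
      omega
    · intro y hy
      have := List.mem_filter.mp hy
      simp only [Bool.and_eq_true, decide_eq_true_eq] at this
      omega
  rw [hmax]

theorem pvALoop_eq_max (waves : List Int) (wave_1 : Int) (a b : Int) :
    pvALoop waves wave_1 (PySem.List.pyRange a b 1) =
      (match (waves.filter (fun w => decide (a ≤ wave_1 - w) && decide (wave_1 - w < b))).max? with
       | some m => m
       | none => -1) := by
  by_cases hba : b ≤ a
  · rw [PySem.List.pyRange_one_eq_nil (by omega)]
    have hnil : (waves.filter (fun w => decide (a ≤ wave_1 - w) && decide (wave_1 - w < b))) = [] := by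
      apply List.filter_eq_nil_iff.mpr
      intro w _
      simp only [Bool.and_eq_true, decide_eq_true_eq, not_and]
      omega
    rw [hnil]
    rfl
  · have hlen : ∃ k, (b - a).toNat = k + 1 := ⟨(b - a).toNat - 1, by omega⟩
    obtain ⟨k, hn⟩ := hlen
    induction k generalizing a with
    | zero =>
      rw [PySem.List.pyRange_one_cons (by omega : a < b)]
      rw [PySem.List.pyRange_one_eq_nil (by omega)]
      simp only [pvALoop]
      by_cases hmem : waves.contains (wave_1 - a)
      · rw [if_pos hmem]
        rw [pvMax_single waves wave_1 a b (by omega) hmem]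
      · rw [if_neg hmem]
        have hnil : (waves.filter (fun w => decide (a ≤ wave_1 - w) && decide (wave_1 - w < b))) = [] := by
          apply List.filter_eq_nil_iff.mpr
          intro w hw
          simp only [Bool.and_eq_true, decide_eq_true_eq, not_and]
          intro h1 h2
          have : w = wave_1 - a := by omega
          exact hmem (List.contains_iff_mem.mpr (this ▸ hw))
        rw [hnil]
        rfl
    | succ k ih =>
      rw [PySem.List.pyRange_one_cons (by omega : a < b)]
      simp only [pvALoop]
      by_cases hmem : waves.contains (wave_1 - a)
      · rw [if_pos hmem]
        rw [pvMax_single waves wave_1 a b (by omega) hmem]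
      · rw [if_neg hmem]
        have hfil : (waves.filter (fun w => decide (a ≤ wave_1 - w) && decide (wave_1 - w < b))) =
            (waves.filter (fun w => decide (a + 1 ≤ wave_1 - w) && decide (wave_1 - w < b))) := by
          apply List.filter_congr
          intro w hw
          have hne : w ≠ wave_1 - a := fun h => hmem (List.contains_iff_mem.mpr (h ▸ hw))
          have h1 : decide (a ≤ wave_1 - w) = decide (a + 1 ≤ wave_1 - w) := by
            rw [decide_eq_decide]
            omega
          rw [h1]
        rw [hfil]
        exact ih (a + 1) (by omega) (by omega)

-- ===== VERDICT (by name: the statement is the Claim_ definition above) =====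
theorem find_nex_smaller_wave_spec : Claim_equal_find_nex_smaller_wave := by
  intro waves wave_1 md _
  unfold Spec_find_nex_smaller_wave find_nex_smaller_wave find_nex_smaller_wave_alt
  exact pvALoop_eq_max waves wave_1 0 md
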